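-- pv_equiv track=rewrite | github.com/cliche-niche/CS20X | CS202/Assignment1/clauses.py | add_cols
-- ===== SOURCE A (Python) =====
-- def add_cols(s, k):
--     # Adds clauses corresponding to each column in the s-th sudoku
--     clauses = []
--
--     for j in range(k**2):
--         for x in range(k**2):
--             single_clause = []
--             for i in range(k**2):
--                 # At most one x in each column
--                 a_sxij = (x) * (k**4) + (s) * (k**6) + (i) * (k**2) + (j) + (1)
--                 single_clause.append(a_sxij)
--
--                 # Redundancy #2
--                 # At most one x in each column
--                 for i0 in range (i+1, k**2):
--                     single = []
--                     single.append(-a_sxij)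
--                     single.append(-(a_sxij + (i0-i) * (k**2)))
--                     clauses.append(single)
--
--             clauses.append(single_clause)
--
--     return clauses
-- ===== SOURCE B (Python) =====
-- def _pairs(vs):
--     # all ordered pairs [-vs[a], -vs[b]] with a < b, by structural recursion
--     if not vs:
--         return []
--     head, rest = vs[0], vs[1:]
--     return [[-head, -w] for w in rest] + _pairs(rest)
--
--
-- def add_cols(s, k):
--     # Pass 1: build the table of variable lists, one per (column j, value x).
--     n = k * k
--     cols = [[[x * n * n + s * n * n * n + i * n + j + 1 for i in range(n)]
--              for x in range(n)]
--             for j in range(n)]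
--     # Pass 2: emit all at-most-one pairs for each list, then the list itself.
--     clauses = []
--     for col in cols:
--         for vs in col:
--             clauses += _pairs(vs)
--             clauses.append(vs)
--     return clauses
-- ===== Notes on version B (the rewrite author's own statement) =====
-- stated objective: alternative
-- what changed: B first builds the full table of per-(column,value) variable lists in one pass, then in a second pass emits the pairwise clauses by structural recursion over each list (head vs tail), replacing A's fused four-deep index loop with its a_sxij + (i0-i)*k**2 offset arithmetic.
import Mathlib
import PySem

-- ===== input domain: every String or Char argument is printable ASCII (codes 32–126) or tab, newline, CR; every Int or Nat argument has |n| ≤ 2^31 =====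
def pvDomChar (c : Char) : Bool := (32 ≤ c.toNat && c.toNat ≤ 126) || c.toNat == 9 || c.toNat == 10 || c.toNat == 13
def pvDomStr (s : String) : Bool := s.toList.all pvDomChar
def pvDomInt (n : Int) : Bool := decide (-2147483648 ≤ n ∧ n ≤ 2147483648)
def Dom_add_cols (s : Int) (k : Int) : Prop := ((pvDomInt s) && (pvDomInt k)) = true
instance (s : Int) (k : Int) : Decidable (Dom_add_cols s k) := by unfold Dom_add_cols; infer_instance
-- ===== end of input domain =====

-- B separates a table-building pass from a pairwise-emission pass (structural recursion over
-- each variable list) instead of A's fused four-deep loop with offset arithmetic; same cost.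


-- ===== PORT A =====
def add_cols (s : Int) (k : Int) : List (List Int) :=
  (PySem.List.pyRange 0 (k^2) 1).foldl (fun clauses j =>
    (PySem.List.pyRange 0 (k^2) 1).foldl (fun clauses x =>
      let p := (PySem.List.pyRange 0 (k^2) 1).foldl
        (fun (p : List (List Int) × List Int) i =>
          let a := x * k^4 + s * k^6 + i * k^2 + j + 1
          let single := p.2 ++ [a]
          let cl := (PySem.List.pyRange (i+1) (k^2) 1).foldl
            (fun cl i0 => cl ++ [[-a, -(a + (i0 - i) * k^2)]]) p.1
          (cl, single)) (clauses, [])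
      p.1 ++ [p.2]) clauses) []

-- ===== PORT B =====
def pvPairs : List Int → List (List Int)
  | [] => []
  | v :: rest => rest.map (fun w => [-v, -w]) ++ pvPairs rest

def add_cols_alt (s : Int) (k : Int) : List (List Int) :=
  let n := k * k
  let cols := (PySem.List.pyRange 0 n 1).map (fun j =>
    (PySem.List.pyRange 0 n 1).map (fun x =>
      (PySem.List.pyRange 0 n 1).map (fun i => x * n * n + s * n * n * n + i * n + j + 1)))
  cols.foldl (fun clauses col =>
    col.foldl (fun clauses vs => (clauses ++ pvPairs vs) ++ [vs]) clauses) []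

-- ===== PRECONDITION & SPEC =====
def Spec_add_cols (s : Int) (k : Int) (out : List (List Int)) : Prop := out = add_cols_alt s k
instance (s : Int) (k : Int) (out : List (List Int)) : Decidable (Spec_add_cols s k out) := by unfold Spec_add_cols; infer_instance

-- ===== CLAIM (what is proved, stated in full; the proofs are below) =====
def Claim_equal_add_cols : Prop := ∀ (s : Int) (k : Int), Dom_add_cols s k → Spec_add_cols s k (add_cols s k)

-- ===== LEMMAS AND PROOFS =====

-- A's fused inner loop produces exactly the pairwise clauses of the mapped range plus the map.
lemma innerA (g : Int → Int) (m : Int) (c : Nat) : ∀ (t : Int), (m - t).toNat = c →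
    ∀ (acc : List (List Int)) (sing : List Int),
  (PySem.List.pyRange t m 1).foldl
    (fun (p : List (List Int) × List Int) i =>
      ((PySem.List.pyRange (i+1) m 1).foldl (fun cl i0 => cl ++ [[-g i, -g i0]]) p.1,
       p.2 ++ [g i]))
    (acc, sing)
  = (acc ++ pvPairs ((PySem.List.pyRange t m 1).map g),
     sing ++ (PySem.List.pyRange t m 1).map g) := by
  induction c with
  | zero =>
    intro t h acc sing
    have hm : m ≤ t := by omega
    rw [PySem.List.pyRange_one_eq_nil hm]
    simp [pvPairs]
  | succ c ih =>
    intro t h acc sing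
    have ht : t < m := by omega
    rw [PySem.List.pyRange_one_cons ht]
    simp only [List.foldl_cons, List.map_cons, pvPairs]
    rw [PySem.List.foldl_append_singleton_eq_map, ih (t+1) (by omega)]
    simp [List.map_map, Function.comp, List.append_assoc]

theorem add_cols_eq (s k : Int) : add_cols s k = add_cols_alt s k := by
  unfold add_cols add_cols_alt
  simp only [List.foldl_map, pow_two]
  apply congrFun
  apply congrFun
  apply congrArg
  funext clauses j
  apply congrFun
  apply congrFun
  apply congrArg
  funext clauses x
  dsimp only
  have hfg : (fun (p : List (List Int) × List Int) i =>
      let a := x * k^4 + s * k^6 + i * (k*k) + j + 1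
      let single := p.2 ++ [a]
      let cl := (PySem.List.pyRange (i+1) (k*k) 1).foldl
        (fun cl i0 => cl ++ [[-a, -(a + (i0 - i) * (k*k))]]) p.1
      (cl, single))
    = (fun (p : List (List Int) × List Int) i =>
      ((PySem.List.pyRange (i+1) (k*k) 1).foldl
        (fun cl i0 => cl ++ [[-(x * k^4 + s * k^6 + i * (k*k) + j + 1),
                              -(x * k^4 + s * k^6 + i0 * (k*k) + j + 1)]]) p.1,
       p.2 ++ [x * k^4 + s * k^6 + i * (k*k) + j + 1])) := by
    funext p i
    have harith : ∀ i0 : Int,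
        (x * k^4 + s * k^6 + i * (k*k) + j + 1) + (i0 - i) * (k*k)
          = x * k^4 + s * k^6 + i0 * (k*k) + j + 1 := by intro i0; ring
    simp only [harith]
  rw [hfg, innerA (fun i => x * k^4 + s * k^6 + i * (k*k) + j + 1) (k*k) ((k*k - 0).toNat) 0 rfl]
  have hmap : (PySem.List.pyRange 0 (k*k) 1).map
        (fun i => x * k^4 + s * k^6 + i * (k*k) + j + 1)
      = (PySem.List.pyRange 0 (k*k) 1).map
        (fun i => x * (k*k) * (k*k) + s * (k*k) * (k*k) * (k*k) + i * (k*k) + j + 1) := by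
    apply List.map_congr_left
    intro i _
    ring
  rw [hmap]
  simp

-- ===== VERDICT (by name: the statement is the Claim_ definition above) =====
theorem add_cols_spec : Claim_equal_add_cols := by
  intro s k _
  exact add_cols_eq s k
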